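-- pv_equiv track=rewrite | github.com/SKNETWORKS-FAMILY-AICAMP/SKN16-FINAL-4Team | scripts/preprocess_emotion.py | extract_pairs_from_messages
-- ===== SOURCE A (Python) =====
-- from typing import List, Dict, Tuple
--
-- def extract_pairs_from_messages(messages: List[Dict], include_system: bool = True) -> List[Tuple[str, str, str]]:
--     """Return list of tuples (system_prompt, user_text, assistant_text).
--
--     For each user message, find the next assistant message and pair them.
--     If include_system=True, concatenate all system messages as system_prompt.
--     """
--     system_parts = [m.get('content', '') for m in messages if m.get('role') == 'system'] if include_system else []
--     system_prompt = ' '.join(system_parts).strip() if system_parts else ''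
--
--     pairs = []
--     # iterate through messages
--     for i, m in enumerate(messages):
--         if m.get('role') == 'user':
--             user_text = m.get('content', '')
--             # find next assistant
--             assistant_text = ''
--             for j in range(i+1, len(messages)):
--                 if messages[j].get('role') == 'assistant':
--                     assistant_text = messages[j].get('content', '')
--                     break
--             pairs.append((system_prompt, user_text, assistant_text))
--     return pairs
-- ===== SOURCE B (Python) =====
-- def extract_pairs_from_messages(messages, include_system=True):
--     """Single backward pass: cache the upcoming assistant content instead of
--     rescanning the tail for every user message."""
--     system_parts = [m.get('content', '') for m in messages if m.get('role') == 'system'] if include_system else []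
--     system_prompt = ' '.join(system_parts).strip() if system_parts else ''
--
--     next_assistant = ''
--     rev_pairs = []
--     for m in reversed(messages):
--         role = m.get('role')
--         if role == 'assistant':
--             next_assistant = m.get('content', '')
--         elif role == 'user':
--             rev_pairs.append((system_prompt, m.get('content', ''), next_assistant))
--     rev_pairs.reverse()
--     return rev_pairs
-- ===== Notes on version B (the rewrite author's own statement) =====
-- stated objective: alternative
-- what changed: Replaced the per-user-message forward rescan for the next assistant message with a single reverse pass that caches the upcoming assistant content.
import Mathlib
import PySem

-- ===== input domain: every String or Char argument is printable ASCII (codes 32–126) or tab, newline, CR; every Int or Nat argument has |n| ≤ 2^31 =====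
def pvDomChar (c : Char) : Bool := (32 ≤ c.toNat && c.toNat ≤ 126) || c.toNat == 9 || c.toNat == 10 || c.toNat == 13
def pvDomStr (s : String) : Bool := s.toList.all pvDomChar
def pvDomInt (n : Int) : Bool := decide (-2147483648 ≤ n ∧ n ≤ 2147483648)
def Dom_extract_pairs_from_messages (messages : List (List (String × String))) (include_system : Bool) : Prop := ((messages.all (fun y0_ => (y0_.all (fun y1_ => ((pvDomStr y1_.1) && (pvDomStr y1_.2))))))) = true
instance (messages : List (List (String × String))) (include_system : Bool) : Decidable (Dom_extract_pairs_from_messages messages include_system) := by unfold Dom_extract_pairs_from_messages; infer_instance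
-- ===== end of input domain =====

-- B replaces A's per-user forward rescan by one reverse pass caching the next assistant content.
-- Python tuples (str, str, str) are ported as List String per the task signature.

-- shared helpers: Python dict.get on an association list (lookup = first match)
def pvGet (m : List (String × String)) (k : String) : Option String :=
  (m.find? (fun p => p.1 == k)).map (·.2)

def pvGetD (m : List (String × String)) (k : String) (d : String) : String :=
  (pvGet m k).getD d

-- system_prompt, computed identically (same code) in both Pythons
def pvSystemPrompt (messages : List (List (String × String))) (include_system : Bool) : String :=
  let system_parts :=
    if include_system then
      (messages.filter (fun m => pvGet m "role" == some "system")).map (fun m => pvGetD m "content" "")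
    else []
  if system_parts ≠ [] then PySem.Str.strip (PySem.Str.join " " system_parts) else ""

-- ===== PORT A =====
-- A's inner 'for j in range(i+1, len(messages))' scans messages[i+1:], i.e. messages.drop (i+1)
def pvNextAssist : List (List (String × String)) → String
  | [] => ""
  | m :: rest => if pvGet m "role" == some "assistant" then pvGetD m "content" "" else pvNextAssist rest

-- A's outer 'for i, m in enumerate(messages)' loop
def pvLoopA (sp : String) (all : List (List (String × String))) :
    List (List (String × String)) → Nat → List (List String) → List (List String)
  | [], _, pairs => pairs
  | m :: rest, i, pairs =>
      pvLoopA sp all rest (i + 1)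
        (if pvGet m "role" == some "user" then
           pairs ++ [[sp, pvGetD m "content" "", pvNextAssist (all.drop (i + 1))]]
         else pairs)

def extract_pairs_from_messages (messages : List (List (String × String))) (include_system : Bool) : List (List String) :=
  let system_prompt := pvSystemPrompt messages include_system
  pvLoopA system_prompt messages messages 0 []

-- ===== PORT B =====
-- one fold over reversed(messages), state = (next_assistant, rev_pairs); result reversed at the end
def pvStepB (sp : String) (st : String × List (List String)) (m : List (String × String)) :
    String × List (List String) :=
  let role := pvGet m "role"
  if role == some "assistant" then (pvGetD m "content" "", st.2)
  else if role == some "user" then (st.1, st.2 ++ [[sp, pvGetD m "content" "", st.1]])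
  else st

def extract_pairs_from_messages_alt (messages : List (List (String × String))) (include_system : Bool) : List (List String) :=
  let system_prompt := pvSystemPrompt messages include_system
  (messages.reverse.foldl (pvStepB system_prompt) ("", [])).2.reverse

-- ===== PRECONDITION & SPEC =====
def Spec_extract_pairs_from_messages (messages : List (List (String × String))) (include_system : Bool) (out : List (List String)) : Prop := out = extract_pairs_from_messages_alt messages include_system
instance (messages : List (List (String × String))) (include_system : Bool) (out : List (List String)) : Decidable (Spec_extract_pairs_from_messages messages include_system out) := by unfold Spec_extract_pairs_from_messages; infer_instance

-- ===== CLAIM (what is proved, stated in full; the proofs are below) =====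
def Claim_equal_extract_pairs_from_messages : Prop := ∀ (messages : List (List (String × String))) (include_system : Bool), Dom_extract_pairs_from_messages messages include_system → Spec_extract_pairs_from_messages messages include_system (extract_pairs_from_messages messages include_system)

-- ===== LEMMAS AND PROOFS =====

-- B's cached next_assistant equals A's forward scan of the remaining suffix
theorem pvFoldB_fst (sp : String) (l : List (List (String × String))) :
    (List.foldr (fun x y => pvStepB sp y x) ("", []) l).1 = pvNextAssist l := by
  induction l with
  | nil => rfl
  | cons m rest ih =>
      rw [List.foldr_cons]
      generalize hst : List.foldr (fun x y => pvStepB sp y x) ("", []) rest = st at ih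
      simp only [pvNextAssist, pvStepB]
      by_cases h1 : pvGet m "role" == some "assistant"
      · simp [h1]
      · by_cases h2 : pvGet m "role" == some "user" <;> simp [h1, h2, ih]

theorem pvLoopA_eq (sp : String) (all : List (List (String × String))) :
    ∀ (l : List (List (String × String))) (i : Nat) (acc : List (List String)),
      all.drop i = l →
      pvLoopA sp all l i acc = acc ++ (l.reverse.foldl (pvStepB sp) ("", [])).2.reverse := by
  intro l
  induction l with
  | nil => intro i acc _; simp [pvLoopA]
  | cons m rest ih =>
      intro i acc hdrop
      have hrest : all.drop (i + 1) = rest := by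
        have h : List.drop 1 (List.drop i all) = List.drop (i + 1) all := List.drop_drop
        rw [hdrop] at h
        exact h.symm
      simp only [pvLoopA, List.reverse_cons, List.foldl_append, List.foldl_cons, List.foldl_nil]
      rw [ih (i + 1) _ hrest]
      simp only [pvStepB, hrest]
      by_cases h1 : pvGet m "role" == some "assistant"
      · have hne : ¬ (pvGet m "role" == some "user") := by
          intro h
          have e1 : pvGet m "role" = some "assistant" := by simpa using h1
          have e2 : pvGet m "role" = some "user" := by simpa using h
          rw [e1] at e2; simp at e2
        simp [h1, hne]
      · by_cases h2 : pvGet m "role" == some "user"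
        · simp [h1, h2, pvFoldB_fst sp rest]
        · simp [h1, h2]

-- ===== VERDICT (by name: the statement is the Claim_ definition above) =====
theorem extract_pairs_from_messages_spec : Claim_equal_extract_pairs_from_messages := by
  intro messages include_system _
  show extract_pairs_from_messages messages include_system
      = extract_pairs_from_messages_alt messages include_system
  unfold extract_pairs_from_messages extract_pairs_from_messages_alt
  exact pvLoopA_eq _ messages messages 0 [] rfl
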